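-- pv_equiv track=rewrite | github.com/ryunzz/orca | packages/world-models/src/personnel.py | _determine_alarm_level
-- ===== SOURCE A (Python) =====
-- ALARM_THRESHOLDS = {
--     1: {"severity_max": 3, "description": "Minor incident - single engine company"},
--     2: {"severity_max": 5, "description": "Working fire - full first alarm assignment"},
--     3: {"severity_max": 7, "description": "Multiple alarm - additional resources"},
--     4: {"severity_max": 9, "description": "Major incident - mutual aid requested"},
--     5: {"severity_max": 10, "description": "Catastrophic - all available resources"},
-- }
--
-- def _determine_alarm_level(severity: int, num_fire_locations: int, integrity_score: int | None) -> int: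
--     """Determine NFPA alarm level from aggregate data."""
--     alarm = 1
--     for level, info in ALARM_THRESHOLDS.items():
--         if severity <= info["severity_max"]:
--             alarm = level
--             break
--     else:
--         alarm = 5
--
--     # Escalate if multiple fire locations
--     if num_fire_locations >= 3:
--         alarm = min(5, alarm + 1)
--
--     # Escalate if structural integrity is compromised
--     if integrity_score is not None and integrity_score <= 4:
--         alarm = min(5, alarm + 1)
--
--     return alarm
-- ===== SOURCE B (Python) =====
-- def _determine_alarm_level(severity: int, num_fire_locations: int, integrity_score: int | None) -> int:
--     """Closed-form NFPA alarm level: arithmetic banding plus capped escalations."""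
--     base = 1 if severity <= 3 else min(5, (severity - 2) // 2 + 1)
--     bumps = (1 if num_fire_locations >= 3 else 0) + (1 if integrity_score is not None and integrity_score <= 4 else 0)
--     return min(5, base + bumps)
-- ===== Notes on version B (the rewrite author's own statement) =====
-- stated objective: simpler
-- what changed: Replaces the dict-threshold for/else scan with a closed-form arithmetic band formula and merges the two capped escalations into one min(5, base + bumps).
import Mathlib
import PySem

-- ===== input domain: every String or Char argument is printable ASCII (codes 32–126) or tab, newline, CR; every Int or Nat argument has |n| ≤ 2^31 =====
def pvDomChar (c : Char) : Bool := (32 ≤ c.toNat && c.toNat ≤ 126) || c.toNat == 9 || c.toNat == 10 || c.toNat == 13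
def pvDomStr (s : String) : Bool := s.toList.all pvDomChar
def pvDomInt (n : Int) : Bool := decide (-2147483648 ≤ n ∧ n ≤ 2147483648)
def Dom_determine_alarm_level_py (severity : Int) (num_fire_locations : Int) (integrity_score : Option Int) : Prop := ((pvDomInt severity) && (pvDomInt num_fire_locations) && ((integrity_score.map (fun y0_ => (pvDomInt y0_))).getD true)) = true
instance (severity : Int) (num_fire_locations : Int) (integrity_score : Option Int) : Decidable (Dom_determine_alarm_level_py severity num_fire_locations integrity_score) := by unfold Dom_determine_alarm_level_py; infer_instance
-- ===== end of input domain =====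

-- B replaces the dict-threshold scan with a closed-form arithmetic band plus a single capped escalation sum (objective: simpler).

-- ===== PORT A =====
-- A's threshold table as an association list (level, severity_max); descriptions are unused by the code
def pvAlarmThresholds : List (Int × Int) := [(1, 3), (2, 5), (3, 7), (4, 9), (5, 10)]

-- the for/else loop: first level whose severity_max admits severity, else 5
def pvAlarmLoop (severity : Int) : List (Int × Int) → Int
  | [] => 5
  | (level, smax) :: rest => if severity ≤ smax then level else pvAlarmLoop severity rest

def determine_alarm_level_py (severity : Int) (num_fire_locations : Int) (integrity_score : Option Int) : Int :=
  let alarm := pvAlarmLoop severity pvAlarmThresholds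
  let alarm := if num_fire_locations ≥ 3 then min 5 (alarm + 1) else alarm
  let alarm := if (match integrity_score with | some i => decide (i ≤ 4) | none => false) then min 5 (alarm + 1) else alarm
  alarm

-- ===== PORT B =====
def determine_alarm_level_py_alt (severity : Int) (num_fire_locations : Int) (integrity_score : Option Int) : Int :=
  let base := if severity ≤ 3 then 1 else min 5 (PySem.Int.floordiv (severity - 2) 2 + 1)
  let bumps := (if num_fire_locations ≥ 3 then (1:Int) else 0) +
               (if (match integrity_score with | some i => decide (i ≤ 4) | none => false) then (1:Int) else 0)
  min 5 (base + bumps)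

-- ===== PRECONDITION & SPEC =====
def Spec_determine_alarm_level_py (severity : Int) (num_fire_locations : Int) (integrity_score : Option Int) (out : Int) : Prop := out = determine_alarm_level_py_alt severity num_fire_locations integrity_score
instance (severity : Int) (num_fire_locations : Int) (integrity_score : Option Int) (out : Int) : Decidable (Spec_determine_alarm_level_py severity num_fire_locations integrity_score out) := by unfold Spec_determine_alarm_level_py; infer_instance

-- ===== CLAIM (what is proved, stated in full; the proofs are below) =====
def Claim_equal_determine_alarm_level_py : Prop := ∀ (severity : Int) (num_fire_locations : Int) (integrity_score : Option Int), Dom_determine_alarm_level_py severity num_fire_locations integrity_score → Spec_determine_alarm_level_py severity num_fire_locations integrity_score (determine_alarm_level_py severity num_fire_locations integrity_score)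

-- ===== LEMMAS AND PROOFS =====
theorem pvAlarmLoop_eq_band (s : Int) :
    pvAlarmLoop s pvAlarmThresholds
      = if s ≤ 3 then 1 else min 5 (PySem.Int.floordiv (s - 2) 2 + 1) := by
  rw [PySem.Int.floordiv_eq_ediv_of_pos (by norm_num)]
  unfold pvAlarmThresholds
  simp only [pvAlarmLoop, min_def]
  split_ifs <;> omega


-- ===== VERDICT (by name: the statement is the Claim_ definition above) =====
theorem determine_alarm_level_py_spec : Claim_equal_determine_alarm_level_py := by
  intro severity num_fire_locations integrity_score _
  unfold Spec_determine_alarm_level_py determine_alarm_level_py determine_alarm_level_py_alt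
  rw [pvAlarmLoop_eq_band, PySem.Int.floordiv_eq_ediv_of_pos (by norm_num)]
  cases integrity_score <;> simp only [min_def] <;> split_ifs
  all_goals try contradiction
  all_goals try norm_num at *
  all_goals first | omega | ring
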